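-- pv_equiv track=rewrite | github.com/dibsc100156/Know_Your_SAP_Masters | backend/app/agents/swarm/planner_agent.py | _collect_tables_used
-- ===== SOURCE A (Python) =====
-- from typing import Dict, Any, List, Optional, Set
--
-- def _collect_tables_used(results: Dict[str, Any]) -> List[str]:
--
--
--     """Collect unique tables from all agent results."""
--
--
--     seen = set()
--
--
--     tables = []
--
--
--     for r in results.values():
--
--
--         for t in r.get("tables_used", []):
--
--
--             if t not in seen:
--
--
--                 seen.add(t)
--
--
--                 tables.append(t)
--
--
--     return tables
-- ===== SOURCE B (Python) =====
-- def _collect_tables_used(results):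
--     """Collect unique tables from all agent results."""
--     def dedup(xs):
--         if not xs:
--             return []
--         head = xs[0]
--         return [head] + dedup([y for y in xs[1:] if y != head])
--     return dedup([t for r in results.values() for t in r.get("tables_used", [])])
-- ===== Notes on version B (the rewrite author's own statement) =====
-- stated objective: alternative
-- what changed: Replaces the single-pass seen-set loop with a two-stage approach: flatten all tables_used lists, then deduplicate by a divide-style recursion that takes the head and filters every later duplicate of it out of the tail before recursing - no seen set and no membership-guarded append remain.
import Mathlib
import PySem

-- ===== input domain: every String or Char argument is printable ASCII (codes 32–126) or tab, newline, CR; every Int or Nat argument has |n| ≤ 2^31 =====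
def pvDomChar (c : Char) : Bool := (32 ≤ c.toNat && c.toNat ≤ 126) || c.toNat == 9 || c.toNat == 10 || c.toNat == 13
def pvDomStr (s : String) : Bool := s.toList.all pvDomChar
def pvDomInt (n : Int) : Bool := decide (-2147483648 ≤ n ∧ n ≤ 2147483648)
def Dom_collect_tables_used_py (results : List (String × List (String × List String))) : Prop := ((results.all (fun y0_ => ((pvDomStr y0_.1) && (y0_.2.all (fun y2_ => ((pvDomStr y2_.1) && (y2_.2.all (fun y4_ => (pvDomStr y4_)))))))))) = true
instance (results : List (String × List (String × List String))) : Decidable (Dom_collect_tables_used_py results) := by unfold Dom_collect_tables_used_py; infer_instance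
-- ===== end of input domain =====

-- B replaces A's single-pass seen-set loop by flattening once and deduplicating with a
-- head-and-filter recursion (no seen set, no membership-guarded append): alternative, same result.

-- ===== PORT A =====
-- seen = set(); tables = []; for r in results.values(): for t in r.get("tables_used", []):
--   if t not in seen: seen.add(t); tables.append(t); return tables
def collect_tables_used_py (results : List (String × List (String × List String))) : List String :=
  (results.foldl
    (fun st kr =>
      (PySem.Dict.getD (PySem.Dict.mk kr.2) "tables_used" []).foldl
        (fun st t =>
          if PySem.Set.contains st.1 t then st
          else (PySem.Set.add st.1 t, st.2 ++ [t]))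
        st)
    ((PySem.Set.empty : PySem.Set String), ([] : List String))).2

-- ===== PORT B =====
-- def dedup(xs): if not xs: return []; head = xs[0]
--   return [head] + dedup([y for y in xs[1:] if y != head])
def pvDedup : List String → List String
  | [] => []
  | head :: rest => head :: pvDedup (rest.filter (fun y => y != head))
termination_by xs => xs.length
decreasing_by
  simp only [List.length_unattach, List.length_cons]
  exact Nat.lt_succ_of_le (le_trans (List.length_filter_le _ _) List.length_attach.le)

-- return dedup([t for r in results.values() for t in r.get("tables_used", [])])
def collect_tables_used_py_alt (results : List (String × List (String × List String))) : List String :=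
  pvDedup
    (results.flatMap (fun kr => PySem.Dict.getD (PySem.Dict.mk kr.2) "tables_used" []))

-- ===== PRECONDITION & SPEC =====
def Spec_collect_tables_used_py (results : List (String × List (String × List String))) (out : List String) : Prop := out = collect_tables_used_py_alt results
instance (results : List (String × List (String × List String))) (out : List String) : Decidable (Spec_collect_tables_used_py results out) := by unfold Spec_collect_tables_used_py; infer_instance

-- ===== CLAIM (what is proved, stated in full; the proofs are below) =====
def Claim_equal_collect_tables_used_py : Prop := ∀ (results : List (String × List (String × List String))), Dom_collect_tables_used_py results → Spec_collect_tables_used_py results (collect_tables_used_py results)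

-- ===== LEMMAS AND PROOFS =====

-- A's inner loop, started with seen = tables (as lists), keeps them equal and acts as
-- repeated PySem.Set.add on that common list.
theorem pvInnerFold (l : List String) (s : List String) :
    l.foldl
      (fun (st : PySem.Set String × List String) t =>
        if PySem.Set.contains st.1 t then st
        else (PySem.Set.add st.1 t, st.2 ++ [t]))
      (s, s)
    = (l.foldl PySem.Set.add s, l.foldl PySem.Set.add s) := by
  induction l generalizing s with
  | nil => rfl
  | cons t l ih =>
    have hstep : (if PySem.Set.contains (s, s).1 t
          then ((s, s) : PySem.Set String × List String)
          else (PySem.Set.add (s, s).1 t, (s, s).2 ++ [t]))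
        = (PySem.Set.add s t, PySem.Set.add s t) := by
      by_cases h : PySem.Set.contains s t = true
      · simp only [h, if_pos]
        rw [PySem.Set.add_of_mem ((PySem.Set.contains_iff _ _).mp h)]
      · simp only [h, Bool.false_eq_true, if_neg, not_false_eq_true]
        rw [PySem.Set.add_of_not_mem (fun hm => h ((PySem.Set.contains_iff _ _).mpr hm))]
    rw [List.foldl_cons, hstep, ih, List.foldl_cons]

-- A's whole loop equals folding PySem.Set.add over the concatenation of all inner lists.
theorem pvOuterFold (rs : List (String × List (String × List String))) (s : List String) :
    rs.foldl
      (fun (st : PySem.Set String × List String) kr =>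
        (PySem.Dict.getD (PySem.Dict.mk kr.2) "tables_used" []).foldl
          (fun st t =>
            if PySem.Set.contains st.1 t then st
            else (PySem.Set.add st.1 t, st.2 ++ [t]))
          st)
      (s, s)
    = ((rs.flatMap (fun kr => PySem.Dict.getD (PySem.Dict.mk kr.2) "tables_used" [])).foldl
        PySem.Set.add s,
       (rs.flatMap (fun kr => PySem.Dict.getD (PySem.Dict.mk kr.2) "tables_used" [])).foldl
        PySem.Set.add s) := by
  induction rs generalizing s with
  | nil => rfl
  | cons kr rs ih =>
    simp only [List.foldl_cons, List.flatMap_cons, List.foldl_append]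
    rw [pvInnerFold, ih]

-- Folding PySem.Set.add over l starting from accumulator s appends exactly the
-- B-side head-and-filter dedup of the elements of l not already in s.
theorem pvFoldAddGen (l : List String) (s : List String) :
    l.foldl PySem.Set.add s = s ++ pvDedup (l.filter (fun y => !PySem.Set.contains s y)) := by
  induction l generalizing s with
  | nil => simp [pvDedup]
  | cons y l ih =>
    by_cases h : PySem.Set.contains s y = true
    · simp only [List.foldl_cons, List.filter_cons, h, Bool.not_true, Bool.false_eq_true,
        if_neg, not_false_eq_true]
      rw [PySem.Set.add_of_mem ((PySem.Set.contains_iff _ _).mp h)]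
      exact ih s
    · have hy : y ∉ s := fun hm => h ((PySem.Set.contains_iff _ _).mpr hm)
      have hpred : ∀ x, (!PySem.Set.contains (s ++ [y]) x)
          = ((x != y) && !PySem.Set.contains s x) := by
        intro x
        apply Bool.eq_iff_iff.mpr
        simp only [Bool.not_eq_eq_eq_not, Bool.not_true, Bool.and_eq_true, bne_iff_ne,
          ← Bool.not_eq_true, PySem.Set.contains_iff, List.mem_append,
          List.mem_singleton]
        tauto
      simp only [List.foldl_cons, List.filter_cons, h, Bool.not_false, if_pos]
      rw [PySem.Set.add_of_not_mem hy, ih, List.append_assoc]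
      congr 1
      rw [pvDedup]
      show y :: pvDedup _ = y :: pvDedup _
      refine congrArg (fun xs => y :: pvDedup xs) ?_
      rw [List.filter_filter]
      exact List.filter_congr (fun x _ => hpred x)

-- Folding Set.add from empty equals the head-and-filter recursion.
theorem pvFoldAddEqDedup (l : List String) :
    l.foldl PySem.Set.add [] = pvDedup l := by
  rw [pvFoldAddGen, List.nil_append]
  congr 1
  rw [List.filter_congr (fun x _ => rfl : ∀ x ∈ l, (!PySem.Set.contains [] x) = true)]
  exact List.filter_true l

-- ===== VERDICT (by name: the statement is the Claim_ definition above) =====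
theorem collect_tables_used_py_spec : Claim_equal_collect_tables_used_py := by
  intro results _
  show collect_tables_used_py results = collect_tables_used_py_alt results
  unfold collect_tables_used_py collect_tables_used_py_alt
  rw [show (PySem.Set.empty : PySem.Set String) = ([] : List String) from rfl]
  rw [pvOuterFold, pvFoldAddEqDedup]
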